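-- pv_equiv track=rewrite | github.com/ipruning/dotfiles | scripts/bin/autocorrect.py | _convert_ascii_double_quotes
-- ===== SOURCE A (Python) =====
-- def _convert_ascii_double_quotes(text: str) -> str:
--     out: list[str] = []
--     open_q = True
--     for ch in text:
--         if ch == '"':
--             out.append("\u300c" if open_q else "\u300d")
--             open_q = not open_q
--         else:
--             out.append(ch)
--     return "".join(out)
-- ===== SOURCE B (Python) =====
-- def _convert_ascii_double_quotes(text: str) -> str:
--     parts = text.split('"')
--     out = [parts[0]]
--     for i, part in enumerate(parts[1:]):
--         out.append("\u300c" if i % 2 == 0 else "\u300d")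
--         out.append(part)
--     return "".join(out)
-- ===== Notes on version B (the rewrite author's own statement) =====
-- stated objective: faster
-- what changed: Replaces the per-character loop with a boolean toggle by splitting on the ASCII double-quote character and interleaving open/close marks chosen by index parity.
import Mathlib
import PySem

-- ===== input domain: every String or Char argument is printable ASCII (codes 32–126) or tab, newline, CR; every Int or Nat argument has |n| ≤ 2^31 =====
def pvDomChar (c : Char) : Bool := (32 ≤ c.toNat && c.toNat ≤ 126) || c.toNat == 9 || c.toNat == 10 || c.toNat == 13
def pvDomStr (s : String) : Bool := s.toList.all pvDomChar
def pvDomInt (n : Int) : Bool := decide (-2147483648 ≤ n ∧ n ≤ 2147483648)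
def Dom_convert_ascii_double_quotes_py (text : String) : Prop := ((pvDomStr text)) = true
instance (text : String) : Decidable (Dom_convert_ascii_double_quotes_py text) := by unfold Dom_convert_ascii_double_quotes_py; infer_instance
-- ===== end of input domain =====

-- B replaces A's per-character toggle loop with split-on-quote + parity-indexed interleaving (alternative decomposition, same cost).


-- ===== PORT A =====
-- out is kept as the flat list of emitted characters ("".join of the appended
-- one-character strings concatenates them in order, so the flat list is exact).
def convert_ascii_double_quotes_py (text : String) : String :=
  let st := text.toList.foldl
    (fun (st : List Char × Bool) ch =>
      if ch = '"' then (st.1 ++ [if st.2 then '「' else '」'], !st.2)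
      else (st.1 ++ [ch], st.2)) ([], true)
  String.mk st.1

-- ===== PORT B =====
-- text.split('"') is ported as Mathlib's List.splitOn on the character list.
def convert_ascii_double_quotes_py_alt (text : String) : String :=
  let parts := text.toList.splitOn '"'
  let rest := (parts.tail.zipIdx).foldl
    (fun acc pi => acc ++ (if pi.2 % 2 == 0 then ['「'] else ['」']) ++ pi.1) []
  String.mk (parts.headI ++ rest)

-- ===== PRECONDITION & SPEC =====
def Spec_convert_ascii_double_quotes_py (text : String) (out : String) : Prop := out = convert_ascii_double_quotes_py_alt text
instance (text : String) (out : String) : Decidable (Spec_convert_ascii_double_quotes_py text out) := by unfold Spec_convert_ascii_double_quotes_py; infer_instance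

-- ===== CLAIM (what is proved, stated in full; the proofs are below) =====
def Claim_equal_convert_ascii_double_quotes_py : Prop := ∀ (text : String), Dom_convert_ascii_double_quotes_py text → Spec_convert_ascii_double_quotes_py text (convert_ascii_double_quotes_py text)

-- ===== LEMMAS AND PROOFS =====

-- non-accumulator form of A's loop body
def pvAgo (b : Bool) : List Char → List Char
  | [] => []
  | c :: cs => if c = '"' then (if b then '「' else '」') :: pvAgo (!b) cs
               else c :: pvAgo b cs

-- glue: interleave alternating marks (starting with parity b) before each part
def pvGlue (b : Bool) : List (List Char) → List Char
  | [] => []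
  | p :: ps => (if b then '「' else '」') :: (p ++ pvGlue (!b) ps)

theorem pvFoldlA (cs : List Char) (acc : List Char) (b : Bool) :
    cs.foldl (fun (st : List Char × Bool) ch =>
      if ch = '"' then (st.1 ++ [if st.2 then '「' else '」'], !st.2)
      else (st.1 ++ [ch], st.2)) (acc, b) =
    (acc ++ pvAgo b cs, b.xor (decide ((cs.count '"') % 2 = 1))) := by
  induction cs generalizing acc b with
  | nil => simp [pvAgo]
  | cons c cs ih =>
    simp only [List.foldl_cons]
    by_cases hc : c = '"'
    · rw [if_pos hc, ih]
      simp only [Prod.mk.injEq]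
      constructor
      · simp [pvAgo, hc]
      · simp only [List.count_cons, hc, beq_self_eq_true, if_true]
        rcases Nat.mod_two_eq_zero_or_one (cs.count '"') with h | h <;>
          rcases b with _ | _ <;> simp [Nat.add_mod, h]
    · rw [if_neg hc, ih]
      simp [pvAgo, hc]

theorem pvMain (cs : List Char) (b : Bool) :
    pvAgo b cs = (cs.splitOn '"').headI ++ pvGlue b (cs.splitOn '"').tail := by
  induction cs generalizing b with
  | nil => simp [pvAgo, pvGlue, List.splitOn, List.splitOnP_nil]
  | cons c cs ih =>
    rcases hs : cs.splitOn '"' with _ | ⟨p, ps⟩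
    · exact absurd hs (List.splitOnP_ne_nil _ _)
    · have hs' : List.splitOnP (fun x => x == '"') cs = p :: ps := hs
      by_cases h : c = '"'
      · rw [show ((c :: cs).splitOn '"') = [] :: p :: ps by
            simp [List.splitOn, List.splitOnP_cons, h, hs']]
        have hih := ih (!b)
        rw [hs] at hih
        simp [pvAgo, h, pvGlue, hih]
      · rw [show ((c :: cs).splitOn '"') = (c :: p) :: ps by
            simp [List.splitOn, List.splitOnP_cons, h, hs']]
        have hih := ih b
        rw [hs] at hih
        simp [pvAgo, h, hih]

theorem pvFoldlB (ps : List (List Char)) (n : Nat) (acc : List Char) :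
    ((ps.zipIdx n).foldl
      (fun acc pi => acc ++ (if pi.2 % 2 == 0 then ['「'] else ['」']) ++ pi.1) acc) =
    acc ++ pvGlue (n % 2 == 0) ps := by
  induction ps generalizing n acc with
  | nil => simp [pvGlue]
  | cons p ps ih =>
    rw [List.zipIdx_cons, List.foldl_cons, ih]
    have h2 : ((n + 1) % 2 == 0) = !(n % 2 == 0) := by
      rcases Nat.mod_two_eq_zero_or_one n with h | h <;> simp [Nat.add_mod, h]
    simp only [pvGlue, h2]
    split_ifs <;> simp

-- ===== VERDICT (by name: the statement is the Claim_ definition above) =====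
theorem convert_ascii_double_quotes_py_spec : Claim_equal_convert_ascii_double_quotes_py := by
  intro text _
  unfold Spec_convert_ascii_double_quotes_py convert_ascii_double_quotes_py convert_ascii_double_quotes_py_alt
  simp only [pvFoldlA, pvFoldlB]
  rw [pvMain text.toList true]
  simp
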